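-- pv_equiv track=rewrite | github.com/Vik-u/Cri-CAN | agentic/llm_adapter.py | clean_llm_output
-- ===== SOURCE A (Python) =====
-- def normalize_ascii(text):
--     replacements = {
--         "\u201c": "\"",
--         "\u201d": "\"",
--         "\u2019": "'",
--         "\u2018": "'",
--         "\u2014": "-",
--         "\u2013": "-",
--         "\u2011": "-",
--         "\u2026": "...",
--     }
--     for src, dst in replacements.items():
--         text = text.replace(src, dst)
--     return text
--
-- def clean_llm_output(text):
--     lines = [line.strip() for line in text.splitlines() if line.strip()]
--     filtered = []
--     for line in lines:
--         lower = line.lower()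
--         if lower.startswith("thinking") or lower.startswith("analysis"):
--             continue
--         if lower.startswith("we need") or lower.startswith("let's"):
--             continue
--         if "done thinking" in lower:
--             continue
--         if line == "...":
--             continue
--         filtered.append(line)
--     if not filtered:
--         filtered = lines
--     result = filtered[-1] if filtered else ""
--     return normalize_ascii(result)
-- ===== SOURCE B (Python) =====
-- def normalize_ascii(text):
--     replacements = {
--         "\u201c": "\"",
--         "\u201d": "\"",
--         "\u2019": "'",
--         "\u2018": "'",
--         "\u2014": "-",
--         "\u2013": "-",
--         "\u2011": "-",
--         "\u2026": "...",
--     }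
--     for src, dst in replacements.items():
--         text = text.replace(src, dst)
--     return text
--
-- def _keep(line):
--     low = line.lower()
--     return not (low.startswith(("thinking", "analysis", "we need", "let's"))
--                 or "done thinking" in low
--                 or line == "...")
--
-- def clean_llm_output(text):
--     lines = [s for s in (line.strip() for line in text.splitlines()) if s]
--     for line in reversed(lines):
--         if _keep(line):
--             return normalize_ascii(line)
--     return normalize_ascii(lines[-1] if lines else "")
-- ===== Notes on version B (the rewrite author's own statement) =====
-- stated objective: simpler
-- what changed: Instead of building the full filtered list forward and taking its last element, B scans the stripped lines from the end and returns the first line passing the guards, falling back to the last original line (or '') when none passes.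
import Mathlib
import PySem

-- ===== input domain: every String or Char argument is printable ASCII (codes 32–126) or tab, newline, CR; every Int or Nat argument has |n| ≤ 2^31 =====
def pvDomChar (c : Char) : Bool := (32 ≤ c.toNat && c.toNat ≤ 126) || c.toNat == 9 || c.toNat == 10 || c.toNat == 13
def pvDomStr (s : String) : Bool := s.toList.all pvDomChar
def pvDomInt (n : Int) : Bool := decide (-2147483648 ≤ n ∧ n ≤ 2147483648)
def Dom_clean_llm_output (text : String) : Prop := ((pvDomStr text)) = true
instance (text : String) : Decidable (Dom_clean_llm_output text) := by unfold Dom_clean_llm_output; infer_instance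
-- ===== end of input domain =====

-- B replaces A's forward filtered-list construction by a backward scan returning the
-- first acceptable line (objective: simpler; no measured speed claim).

-- shared module helper normalize_ascii (identical in both Pythons)
def pvNormalizeAscii (text : String) : String :=
  [("\u201c", "\""), ("\u201d", "\""), ("\u2019", "'"), ("\u2018", "'"),
   ("\u2014", "-"), ("\u2013", "-"), ("\u2011", "-"), ("\u2026", "...")].foldl
    (fun t p => PySem.Str.replace t p.1 p.2) text

-- 'lines = [line.strip() for line in text.splitlines() if line.strip()]' (identical in both Pythons)
def pvLines (text : String) : List String :=
  (PySem.Str.splitlines text).filterMap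
    (fun l => let s := PySem.Str.strip l; if s = "" then none else some s)

-- ===== PORT A =====
def clean_llm_output (text : String) : String :=
  let lines := pvLines text
  let filtered := lines.foldl
    (fun acc line =>
      let lower := PySem.Str.lower line
      if PySem.Str.startswith lower "thinking" || PySem.Str.startswith lower "analysis" then acc
      else if PySem.Str.startswith lower "we need" || PySem.Str.startswith lower "let's" then acc
      else if PySem.Str.isIn "done thinking" lower then acc
      else if line == "..." then acc
      else acc ++ [line]) []
  let filtered := if filtered = [] then lines else filtered
  let result := match filtered.getLast? with | some r => r | none => ""
  pvNormalizeAscii result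

-- ===== PORT B =====
-- B's guard: line passes all checks
def pvKeep (line : String) : Bool :=
  let low := PySem.Str.lower line
  !(PySem.Str.startswith low "thinking" || PySem.Str.startswith low "analysis" ||
    PySem.Str.startswith low "we need" || PySem.Str.startswith low "let's" ||
    PySem.Str.isIn "done thinking" low || line == "...")

def clean_llm_output_alt (text : String) : String :=
  let lines := pvLines text
  match lines.reverse.find? pvKeep with
  | some l => pvNormalizeAscii l
  | none => pvNormalizeAscii (match lines.getLast? with | some r => r | none => "")

-- ===== PRECONDITION & SPEC =====
def Spec_clean_llm_output (text : String) (out : String) : Prop := out = clean_llm_output_alt text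
instance (text : String) (out : String) : Decidable (Spec_clean_llm_output text out) := by unfold Spec_clean_llm_output; infer_instance

-- ===== CLAIM (what is proved, stated in full; the proofs are below) =====
def Claim_equal_clean_llm_output : Prop := ∀ (text : String), Dom_clean_llm_output text → Spec_clean_llm_output text (clean_llm_output text)

-- ===== LEMMAS AND PROOFS =====

-- boolean shape of A's guard chain vs B's single negated disjunction
theorem pv_guard_bool (b1 b2 b3 b4 b5 b6 : Bool) (acc : List String) (line : String) :
    (if b1 || b2 then acc
     else if b3 || b4 then acc
     else if b5 then acc
     else if b6 then acc
     else acc ++ [line]) =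
    (if !(b1 || b2 || b3 || b4 || b5 || b6) then acc ++ [line] else acc) := by
  cases b1 <;> cases b2 <;> cases b3 <;> cases b4 <;> cases b5 <;> cases b6 <;> rfl

-- A's filtered list is the filter of B's guard
set_option maxHeartbeats 1000000 in
theorem pv_filtered_eq (lines : List String) :
    lines.foldl
      (fun acc line =>
        let lower := PySem.Str.lower line
        if PySem.Str.startswith lower "thinking" || PySem.Str.startswith lower "analysis" then acc
        else if PySem.Str.startswith lower "we need" || PySem.Str.startswith lower "let's" then acc
        else if PySem.Str.isIn "done thinking" lower then acc
        else if line == "..." then acc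
        else acc ++ [line]) [] = lines.filter pvKeep := by
  refine (List.foldl_ext _ _ [] ?_).trans
    (by simpa using PySem.List.foldl_append_if_eq_filter pvKeep lines [])
  intro acc line _
  show (if PySem.Str.startswith (PySem.Str.lower line) "thinking" ||
            PySem.Str.startswith (PySem.Str.lower line) "analysis" then acc
        else if PySem.Str.startswith (PySem.Str.lower line) "we need" ||
            PySem.Str.startswith (PySem.Str.lower line) "let's" then acc
        else if PySem.Str.isIn "done thinking" (PySem.Str.lower line) then acc
        else if line == "..." then acc
        else acc ++ [line]) = if pvKeep line then acc ++ [line] else acc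
  simp only [pvKeep]
  set b1 := PySem.Str.startswith (PySem.Str.lower line) "thinking"
  set b2 := PySem.Str.startswith (PySem.Str.lower line) "analysis"
  set b3 := PySem.Str.startswith (PySem.Str.lower line) "we need"
  set b4 := PySem.Str.startswith (PySem.Str.lower line) "let's"
  set b5 := PySem.Str.isIn "done thinking" (PySem.Str.lower line)
  set b6 := (line == "...")
  exact pv_guard_bool b1 b2 b3 b4 b5 b6 acc line

-- last kept line forward = first kept line backward
theorem pv_last_filter_eq_find_reverse (l : List String) (p : String → Bool) :
    (l.filter p).getLast? = l.reverse.find? p := by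
  rw [List.getLast?_eq_head?_reverse, ← List.filter_reverse]
  exact List.head?_filter

-- the two ports agree for every line list
theorem pv_core (lines : List String) :
    (let filtered := lines.foldl
      (fun acc line =>
        let lower := PySem.Str.lower line
        if PySem.Str.startswith lower "thinking" || PySem.Str.startswith lower "analysis" then acc
        else if PySem.Str.startswith lower "we need" || PySem.Str.startswith lower "let's" then acc
        else if PySem.Str.isIn "done thinking" lower then acc
        else if line == "..." then acc
        else acc ++ [line]) []
     let filtered := if filtered = [] then lines else filtered
     let result := match filtered.getLast? with | some r => r | none => ""
     pvNormalizeAscii result) =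
    (match lines.reverse.find? pvKeep with
     | some l => pvNormalizeAscii l
     | none => pvNormalizeAscii (match lines.getLast? with | some r => r | none => "")) := by
  simp only [pv_filtered_eq lines, ← pv_last_filter_eq_find_reverse lines pvKeep]
  cases h : (lines.filter pvKeep).getLast? with
  | some l =>
      have hne : lines.filter pvKeep ≠ [] := by
        intro he; rw [he] at h; simp at h
      simp [hne, h]
  | none =>
      have he : lines.filter pvKeep = [] := List.getLast?_eq_none_iff.mp h
      simp [he]

-- ===== VERDICT (by name: the statement is the Claim_ definition above) =====
theorem clean_llm_output_spec : Claim_equal_clean_llm_output := by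
  intro text _
  show clean_llm_output text = clean_llm_output_alt text
  exact pv_core (pvLines text)
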